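-- pv_equiv track=rewrite | github.com/ViniciusHenriqueB/Estrutura-de-Dados | revisao-p1/d.py | decodificador
-- ===== SOURCE A (Python) =====
-- def decodificador(string_codificada):
--     saida = ''
--     lista_saida = []
--     upper = []
--     lower = []
--
--     for letra in string_codificada:
--
--         if ord(letra) >= 65 and ord(letra) <= 90:
--
--             if letra != 'B':
--                 lista_saida.insert(0, letra)
--                 upper.append(letra)
--                 last_upper = letra
--
--             elif upper != []:
--                 lista_saida.remove(last_upper)
--                 upper.pop()
--                 if len(upper) == 0:
--                     last_upper = None
--                 else:
--                     last_upper = upper[len(upper) - 1]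
--
--
--         elif ord(letra) >= 97 and ord(letra) <= 122:
--
--             if letra != 'b':
--                 lista_saida.insert(0, letra)
--                 lower.append(letra)
--                 last_lower = letra
--
--             elif lower != []:
--                 lista_saida.remove(last_lower)
--                 lower.pop()
--                 if len(lower) == 0:
--                     last_lower = None
--                 else:
--                     last_lower = lower[len(lower) - 1]
--
--     for letra in range(len(lista_saida) - 1, -1, -1):
--         saida += lista_saida[letra]
--
--     return saida
-- ===== SOURCE B (Python) =====
-- def decodificador(string_codificada):
--     # One pass over the byte codes; two stacks of surviving positions; emit survivors in order.
--     up = []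
--     lo = []
--     for i, o in enumerate(string_codificada.encode('latin-1', 'replace')):
--         if 64 < o < 91:
--             if o != 66:          # not 'B'
--                 up.append(i)
--             elif up:
--                 up.pop()
--         elif 96 < o < 123:
--             if o != 98:          # not 'b'
--                 lo.append(i)
--             elif lo:
--                 lo.pop()
--     return ''.join(string_codificada[i] for i in sorted(up + lo))
-- ===== Notes on version B (the rewrite author's own statement) =====
-- stated objective: faster
-- what changed: Replaces A's survivor list with O(n) front-insert/remove per character by a single pass over the byte codes keeping two stacks of surviving positions (popped on B/b), then emits survivors sorted by position.
import Mathlib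
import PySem

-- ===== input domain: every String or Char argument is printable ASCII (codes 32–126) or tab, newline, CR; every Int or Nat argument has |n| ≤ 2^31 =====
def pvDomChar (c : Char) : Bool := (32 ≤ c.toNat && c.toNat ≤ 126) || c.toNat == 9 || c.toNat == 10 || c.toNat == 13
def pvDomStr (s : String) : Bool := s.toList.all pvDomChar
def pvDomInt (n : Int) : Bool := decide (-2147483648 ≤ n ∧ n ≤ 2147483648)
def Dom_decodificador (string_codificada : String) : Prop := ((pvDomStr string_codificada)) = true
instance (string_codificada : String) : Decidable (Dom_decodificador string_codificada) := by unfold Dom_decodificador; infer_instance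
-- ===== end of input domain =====

-- B replaces A's front-insert/remove survivor list (linear work per character) by two
-- stacks of surviving positions, emitting the survivors in position order (objective: faster).

-- ===== PORT A =====
-- state = (lista_saida, upper, lower, last_upper, last_lower); last_* is `none` while unset/None
def pvAStep (st : List Char × List Char × List Char × Option Char × Option Char)
    (letra : Char) : List Char × List Char × List Char × Option Char × Option Char :=
  let (lista, upper, lower, lu, ll) := st
  if 65 ≤ letra.toNat ∧ letra.toNat ≤ 90 then
    if letra ≠ 'B' then
      (letra :: lista, upper ++ [letra], lower, some letra, ll)    -- insert(0,·), append, last_upper = letra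
    else if upper ≠ [] then
      -- lista_saida.remove(last_upper); the ValueError case is unreachable (last_upper is always in lista_saida here)
      let lista' := (PySem.List.remove? lista (lu.getD ' ')).getD lista
      let upper' := upper.dropLast                                  -- upper.pop()
      let lu' := if upper'.length = 0 then none else upper'.getLast?  -- upper[len(upper)-1]
      (lista', upper', lower, lu', ll)
    else (lista, upper, lower, lu, ll)
  else if 97 ≤ letra.toNat ∧ letra.toNat ≤ 122 then
    if letra ≠ 'b' then
      (letra :: lista, upper, lower ++ [letra], lu, some letra)
    else if lower ≠ [] then
      let lista' := (PySem.List.remove? lista (ll.getD ' ')).getD lista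
      let lower' := lower.dropLast
      let ll' := if lower'.length = 0 then none else lower'.getLast?
      (lista', upper, lower', lu, ll')
    else (lista, upper, lower, lu, ll)
  else (lista, upper, lower, lu, ll)

def decodificador (string_codificada : String) : String :=
  let st := string_codificada.toList.foldl pvAStep ([], [], [], none, none)
  let lista := st.1
  -- for letra in range(len(lista_saida)-1, -1, -1): saida += lista_saida[letra]  (index always in range)
  String.mk ((PySem.List.pyRange (PySem.List.len lista - 1) (-1) (-1)).foldl
    (fun saida i => saida ++ [PySem.List.pyGetD lista i ' ']) [])

-- ===== PORT B =====
-- s.encode('latin-1', 'replace'): one byte code per character; characters above U+00FF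
-- become '?' (code 63). This hand-ported primitive is exact on every input.
def pvByte (c : Char) : Nat := if c.toNat ≤ 255 then c.toNat else 63

def pvBStep (st : List Int × List Int) (io : Int × Nat) : List Int × List Int :=
  let (up, lo) := st
  let (i, o) := io
  if 64 < o ∧ o < 91 then
    if o ≠ 66 then (up ++ [i], lo)
    else if up ≠ [] then (up.dropLast, lo)     -- up.pop()
    else (up, lo)
  else if 96 < o ∧ o < 123 then
    if o ≠ 98 then (up, lo ++ [i])
    else if lo ≠ [] then (up, lo.dropLast)
    else (up, lo)
  else (up, lo)

def decodificador_alt (string_codificada : String) : String :=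
  let st := (PySem.List.enumerate (string_codificada.toList.map pvByte) 0).foldl pvBStep ([], [])
  -- ''.join(string_codificada[i] for i in sorted(up + lo))  (indices come from enumerate, always in range)
  String.mk ((PySem.List.sorted (st.1 ++ st.2) (fun x => x) false).map
    (fun i => PySem.List.pyGetD string_codificada.toList i ' '))

-- ===== PRECONDITION & SPEC =====
def Spec_decodificador (string_codificada : String) (out : String) : Prop := out = decodificador_alt string_codificada
instance (string_codificada : String) (out : String) : Decidable (Spec_decodificador string_codificada out) := by unfold Spec_decodificador; infer_instance

-- ===== CLAIM (what is proved, stated in full; the proofs are below) =====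
def Claim_equal_decodificador : Prop := ∀ (string_codificada : String), Dom_decodificador string_codificada → Spec_decodificador string_codificada (decodificador string_codificada)

-- ===== LEMMAS AND PROOFS =====

def pvGet (cs : List Char) (j : Int) : Char := PySem.List.pyGetD cs j ' '

def pvIsUp (c : Char) : Prop := 65 ≤ c.toNat ∧ c.toNat ≤ 90 ∧ c ≠ 'B'
def pvIsLo (c : Char) : Prop := 97 ≤ c.toNat ∧ c.toNat ≤ 122 ∧ c ≠ 'b'

-- the coupling invariant between A's state and B's stacks after processing the first i chars:
-- m is the strictly increasing list of surviving positions
def pvInv (cs : List Char) (i : Int)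
    (st : List Char × List Char × List Char × Option Char × Option Char)
    (b : List Int × List Int) : Prop :=
  ∃ m : List Int,
    m.Pairwise (· < ·) ∧ m.Perm (b.1 ++ b.2) ∧
    b.1.Pairwise (· < ·) ∧ b.2.Pairwise (· < ·) ∧
    (∀ j ∈ b.1, 0 ≤ j ∧ j < i ∧ pvIsUp (pvGet cs j)) ∧
    (∀ j ∈ b.2, 0 ≤ j ∧ j < i ∧ pvIsLo (pvGet cs j)) ∧
    st.1 = (m.map (pvGet cs)).reverse ∧
    st.2.1 = b.1.map (pvGet cs) ∧
    st.2.2.1 = b.2.map (pvGet cs) ∧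
    st.2.2.2.1 = (b.1.map (pvGet cs)).getLast? ∧
    st.2.2.2.2 = (b.2.map (pvGet cs)).getLast?

lemma pvInvMono (cs : List Char) (i i' : Int) (st : List Char × List Char × List Char × Option Char × Option Char)
    (b : List Int × List Int) (h : pvInv cs i st b) (hle : i ≤ i') : pvInv cs i' st b := by
  obtain ⟨m, h1, h2, h3, h4, h5, h6, h7⟩ := h
  exact ⟨m, h1, h2, h3, h4,
    fun j hj => ⟨(h5 j hj).1, lt_of_lt_of_le (h5 j hj).2.1 hle, (h5 j hj).2.2⟩,
    fun j hj => ⟨(h6 j hj).1, lt_of_lt_of_le (h6 j hj).2.1 hle, (h6 j hj).2.2⟩, h7⟩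

lemma pvRemoveAppend {α : Type} [BEq α] [LawfulBEq α] (xs ys : List α) (v : α) (h : v ∉ xs) :
    PySem.List.remove? (xs ++ v :: ys) v = some (xs ++ ys) := by
  induction xs with
  | nil => simp [PySem.List.remove?_cons_self]
  | cons x xs ih =>
    have hx : x ≠ v := by intro e; exact h (e ▸ List.mem_cons_self)
    have h' : v ∉ xs := fun hv => h (List.mem_cons_of_mem _ hv)
    rw [List.cons_append, PySem.List.remove?_cons_of_ne _ hx, ih h']
    rfl

lemma pvUpNeLo {c d : Char} (hc : pvIsUp c) (hd : pvIsLo d) : c ≠ d := by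
  intro e
  obtain ⟨-, h2, -⟩ := hc
  obtain ⟨h3, -, -⟩ := hd
  rw [e] at h2
  omega

lemma pvToNatInj {c d : Char} (h : c.toNat = d.toNat) : c = d := by
  apply Char.ext
  apply UInt32.toNat_inj.mp
  exact h

-- one step of both loops preserves the invariant
lemma pvStep (cs : List Char) (i : Int) (c : Char) (hi : 0 ≤ i) (hc : pvGet cs i = c)
    (st : List Char × List Char × List Char × Option Char × Option Char)
    (b : List Int × List Int) (h : pvInv cs i st b) :
    pvInv cs (i + 1) (pvAStep st c) (pvBStep b (i, pvByte c)) := by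
  obtain ⟨lista, upper, lower, lu, ll⟩ := st
  obtain ⟨up, lo⟩ := b
  obtain ⟨m, hpw, hperm, hupw, hlpw, hup, hlo, h1, h2, h3, h4, h5⟩ := h
  simp only at h1 h2 h3 h4 h5 hup hlo hperm hupw hlpw
  by_cases hU : 65 ≤ c.toNat ∧ c.toNat ≤ 90
  · by_cases hB : c = 'B'
    · by_cases hne : up = []
      · -- 'B' with empty upper stack: both sides do nothing
        have hne' : upper = [] := by rw [h2, hne]; rfl
        have eA : pvAStep (lista, upper, lower, lu, ll) c = (lista, upper, lower, lu, ll) := by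
          simp [pvAStep, hB, hne']
        have hb66 : pvByte c = 66 := by rw [hB]; decide
        have eB : pvBStep (up, lo) (i, pvByte c) = (up, lo) := by
          simp only [pvBStep, hb66]
          rw [if_pos (by omega), if_neg (by simp), if_neg (by simp [hne])]
        rw [eA, eB]
        exact pvInvMono cs i _ _ _ ⟨m, hpw, hperm, hupw, hlpw, hup, hlo, h1, h2, h3, h4, h5⟩ (by omega)
      · -- 'B' pops the most recent surviving uppercase
        have hne' : upper ≠ [] := by rw [h2]; simpa [List.map_eq_nil_iff] using hne
        set g := pvGet cs with hg
        set u₀ := up.dropLast with hu₀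
        set k := up.getLast hne with hk
        have hdec : u₀ ++ [k] = up := List.dropLast_append_getLast hne
        have hlu : lu = some (g k) := by
          rw [h4, List.getLast?_map, List.getLast?_eq_getLast hne]; rfl
        have hkup : k ∈ up := List.getLast_mem hne
        have hkm : k ∈ m := hperm.mem_iff.mpr (List.mem_append.mpr (Or.inl hkup))
        obtain ⟨m₁, m₂, hm⟩ := List.append_of_mem hkm
        subst hm
        obtain ⟨pw₁, pwk, hcross⟩ := List.pairwise_append.mp hpw
        obtain ⟨hkb, pw₂⟩ := List.pairwise_cons.mp pwk
        -- every position after k in m is a surviving lowercase position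
        have hm₂lo : ∀ j ∈ m₂, j ∈ lo := by
          intro j hj
          have hjm : j ∈ m₁ ++ k :: m₂ := List.mem_append.mpr (Or.inr (List.mem_cons_of_mem _ hj))
          have hkj : k < j := hkb j hj
          rcases List.mem_append.mp (hperm.mem_iff.mp hjm) with hju | hjl
          · exfalso
            rw [← hdec] at hju
            rcases List.mem_append.mp hju with hju0 | hjk
            · have : j < k :=
                (List.pairwise_append.mp (hdec ▸ hupw)).2.2 j hju0 k (by simp)
              omega
            · have : j = k := List.mem_singleton.mp hjk
              omega
          · exact hjl
        have hkUp : pvIsUp (g k) := (hup k hkup).2.2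
        have hnotmem : g k ∉ (m₂.map g).reverse := by
          simp only [List.mem_reverse, List.mem_map, not_exists, not_and]
          intro j hj e
          exact pvUpNeLo hkUp ((hlo j (hm₂lo j hj)).2.2) e.symm
        have hlista : lista = (m₂.map g).reverse ++ g k :: (m₁.map g).reverse := by
          rw [h1]; simp [hg]
        have hrem : (PySem.List.remove? lista (lu.getD ' ')).getD lista
            = (m₂.map g).reverse ++ (m₁.map g).reverse := by
          rw [hlu, hlista]
          simp only [Option.getD_some]
          rw [pvRemoveAppend _ _ _ hnotmem]
          rfl
        have eA : pvAStep (lista, upper, lower, lu, ll) c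
            = ((PySem.List.remove? lista (lu.getD ' ')).getD lista, upper.dropLast, lower,
               (if upper.dropLast.length = 0 then none else upper.dropLast.getLast?), ll) := by
          simp [pvAStep, hB, hne']
        have hb66 : pvByte c = 66 := by rw [hB]; decide
        have eB : pvBStep (up, lo) (i, pvByte c) = (u₀, lo) := by
          simp only [pvBStep, hb66]
          rw [if_pos (by omega), if_neg (by simp), if_pos hne]
        rw [eA, eB]
        have hupper' : upper.dropLast = u₀.map g := by
          rw [h2, ← hdec]
          simp
        refine ⟨m₁ ++ m₂, ?_, ?_, ?_, hlpw, ?_, ?_, ?_, ?_, h3, ?_, h5⟩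
        · exact hpw.sublist (List.Sublist.append_left (List.sublist_cons_self _ _) _)
        · -- (m₁ ++ m₂).Perm (u₀ ++ lo)
          have p1 : (m₁ ++ k :: m₂).Perm (k :: (m₁ ++ m₂)) := List.perm_middle
          have p2 : (u₀ ++ k :: lo).Perm (k :: (u₀ ++ lo)) := List.perm_middle
          have hul : up ++ lo = u₀ ++ k :: lo := by rw [← hdec]; simp
          have : (k :: (m₁ ++ m₂)).Perm (k :: (u₀ ++ lo)) :=
            (p1.symm.trans (hperm.trans (by rw [hul]))).trans p2
          exact this.cons_inv
        · exact hupw.sublist (List.dropLast_sublist up)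
        · intro j hj
          have := hup j (List.Sublist.mem hj (hdec ▸ List.sublist_append_left u₀ [k]))
          exact ⟨this.1, by omega, this.2.2⟩
        · intro j hj
          have := hlo j hj
          exact ⟨this.1, by omega, this.2.2⟩
        · rw [hrem]; simp [hg]
        · exact hupper'
        · rw [hupper']
          split_ifs with hz
          · rw [List.length_eq_zero_iff.mp hz]; rfl
          · rfl
    · -- uppercase letter other than 'B': push
      have hc' : pvGet cs i = c := hc
      have eA : pvAStep (lista, upper, lower, lu, ll) c
          = (c :: lista, upper ++ [c], lower, some c, ll) := by
        simp [pvAStep, hU, hB]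
      have hbyte : pvByte c = c.toNat := by unfold pvByte; rw [if_pos (by omega)]
      have h66 : c.toNat ≠ 66 := fun e => hB (pvToNatInj e)
      have eB : pvBStep (up, lo) (i, pvByte c) = (up ++ [i], lo) := by
        simp only [pvBStep, hbyte]
        rw [if_pos (by omega), if_pos h66]
      rw [eA, eB]
      have hmlt : ∀ j ∈ m, j < i := by
        intro j hj
        rcases List.mem_append.mp (hperm.mem_iff.mp hj) with hju | hjl
        · exact (hup j hju).2.1
        · exact (hlo j hjl).2.1
      refine ⟨m ++ [i], ?_, ?_, ?_, hlpw, ?_, ?_, ?_, ?_, h3, ?_, h5⟩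
      · exact List.pairwise_append.mpr ⟨hpw, List.pairwise_singleton _ _,
          fun a ha b hb => (List.mem_singleton.mp hb) ▸ hmlt a ha⟩
      · have p1 : (m ++ [i]).Perm (i :: m) := by
          simp
        have p2 : (up ++ i :: lo).Perm (i :: (up ++ lo)) := List.perm_middle
        have : (i :: m).Perm (up ++ [i] ++ lo) := by
          refine ((hperm.cons i).trans p2.symm).trans ?_
          simp
        exact p1.trans this
      · exact List.pairwise_append.mpr ⟨hupw, List.pairwise_singleton _ _,
          fun a ha b hb => (List.mem_singleton.mp hb) ▸ (hup a ha).2.1⟩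
      · intro j hj
        rcases List.mem_append.mp hj with hju | hji
        · have := hup j hju; exact ⟨this.1, by omega, this.2.2⟩
        · have : j = i := List.mem_singleton.mp hji
          subst this
          exact ⟨hi, by omega, by rw [hc']; exact ⟨hU.1, hU.2, hB⟩⟩
      · intro j hj
        have := hlo j hj; exact ⟨this.1, by omega, this.2.2⟩
      · simp [h1, hc']
      · simp [h2, hc']
      · simp [hc']
  · by_cases hL : 97 ≤ c.toNat ∧ c.toNat ≤ 122
    · by_cases hB : c = 'b'
      · by_cases hne : lo = []
        · have hne' : lower = [] := by rw [h3, hne]; rfl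
          have eA : pvAStep (lista, upper, lower, lu, ll) c = (lista, upper, lower, lu, ll) := by
            simp [pvAStep, hB, hne']
          have hb98 : pvByte c = 98 := by rw [hB]; decide
          have eB : pvBStep (up, lo) (i, pvByte c) = (up, lo) := by
            simp only [pvBStep, hb98]
            rw [if_neg (by omega), if_pos (by omega), if_neg (by simp), if_neg (by simp [hne])]
          rw [eA, eB]
          exact pvInvMono cs i _ _ _ ⟨m, hpw, hperm, hupw, hlpw, hup, hlo, h1, h2, h3, h4, h5⟩ (by omega)
        · -- 'b' pops the most recent surviving lowercase
          have hne' : lower ≠ [] := by rw [h3]; simpa [List.map_eq_nil_iff] using hne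
          set g := pvGet cs with hg
          set l₀ := lo.dropLast with hl₀
          set k := lo.getLast hne with hk
          have hdec : l₀ ++ [k] = lo := List.dropLast_append_getLast hne
          have hll : ll = some (g k) := by
            rw [h5, List.getLast?_map, List.getLast?_eq_getLast hne]; rfl
          have hklo : k ∈ lo := List.getLast_mem hne
          have hkm : k ∈ m := hperm.mem_iff.mpr (List.mem_append.mpr (Or.inr hklo))
          obtain ⟨m₁, m₂, hm⟩ := List.append_of_mem hkm
          subst hm
          obtain ⟨pw₁, pwk, hcross⟩ := List.pairwise_append.mp hpw
          obtain ⟨hkb, pw₂⟩ := List.pairwise_cons.mp pwk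
          -- every position after k in m is a surviving uppercase position
          have hm₂up : ∀ j ∈ m₂, j ∈ up := by
            intro j hj
            have hjm : j ∈ m₁ ++ k :: m₂ := List.mem_append.mpr (Or.inr (List.mem_cons_of_mem _ hj))
            have hkj : k < j := hkb j hj
            rcases List.mem_append.mp (hperm.mem_iff.mp hjm) with hju | hjl
            · exact hju
            · exfalso
              rw [← hdec] at hjl
              rcases List.mem_append.mp hjl with hjl0 | hjk
              · have : j < k :=
                  (List.pairwise_append.mp (hdec ▸ hlpw)).2.2 j hjl0 k (by simp)
                omega
              · have : j = k := List.mem_singleton.mp hjk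
                omega
          have hkLo : pvIsLo (g k) := (hlo k hklo).2.2
          have hnotmem : g k ∉ (m₂.map g).reverse := by
            simp only [List.mem_reverse, List.mem_map, not_exists, not_and]
            intro j hj e
            exact pvUpNeLo ((hup j (hm₂up j hj)).2.2) hkLo e
          have hlista : lista = (m₂.map g).reverse ++ g k :: (m₁.map g).reverse := by
            rw [h1]; simp [hg]
          have hrem : (PySem.List.remove? lista (ll.getD ' ')).getD lista
              = (m₂.map g).reverse ++ (m₁.map g).reverse := by
            rw [hll, hlista]
            simp only [Option.getD_some]
            rw [pvRemoveAppend _ _ _ hnotmem]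
            rfl
          have eA : pvAStep (lista, upper, lower, lu, ll) c
              = ((PySem.List.remove? lista (ll.getD ' ')).getD lista, upper, lower.dropLast,
                 lu, (if lower.dropLast.length = 0 then none else lower.dropLast.getLast?)) := by
            simp [pvAStep, hB, hne']
          have hb98 : pvByte c = 98 := by rw [hB]; decide
          have eB : pvBStep (up, lo) (i, pvByte c) = (up, l₀) := by
            simp only [pvBStep, hb98]
            rw [if_neg (by omega), if_pos (by omega), if_neg (by simp), if_pos hne]
          rw [eA, eB]
          have hlower' : lower.dropLast = l₀.map g := by
            rw [h3, ← hdec]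
            simp
          refine ⟨m₁ ++ m₂, ?_, ?_, hupw, ?_, ?_, ?_, ?_, h2, ?_, h4, ?_⟩
          · exact hpw.sublist (List.Sublist.append_left (List.sublist_cons_self _ _) _)
          · have p1 : (m₁ ++ k :: m₂).Perm (k :: (m₁ ++ m₂)) := List.perm_middle
            have p2 : ((up ++ l₀) ++ [k]).Perm (k :: (up ++ l₀)) := by
              simpa using (List.perm_middle (a := k) (l₁ := up ++ l₀) (l₂ := []))
            have hul : up ++ lo = (up ++ l₀) ++ [k] := by rw [← hdec]; simp
            have : (k :: (m₁ ++ m₂)).Perm (k :: (up ++ l₀)) :=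
              (p1.symm.trans (hperm.trans (by rw [hul]))).trans p2
            exact this.cons_inv
          · exact hlpw.sublist (List.dropLast_sublist lo)
          · intro j hj
            have := hup j hj
            exact ⟨this.1, by omega, this.2.2⟩
          · intro j hj
            have := hlo j (List.Sublist.mem hj (hdec ▸ List.sublist_append_left l₀ [k]))
            exact ⟨this.1, by omega, this.2.2⟩
          · rw [hrem]; simp [hg]
          · exact hlower'
          · rw [hlower']
            split_ifs with hz
            · rw [List.length_eq_zero_iff.mp hz]; rfl
            · rfl
      · -- lowercase letter other than 'b': push
        have eA : pvAStep (lista, upper, lower, lu, ll) c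
            = (c :: lista, upper, lower ++ [c], lu, some c) := by
          simp [pvAStep, hU, hL, hB]
        have hbyte : pvByte c = c.toNat := by unfold pvByte; rw [if_pos (by omega)]
        have h98 : c.toNat ≠ 98 := fun e => hB (pvToNatInj e)
        have eB : pvBStep (up, lo) (i, pvByte c) = (up, lo ++ [i]) := by
          simp only [pvBStep, hbyte]
          rw [if_neg (by omega), if_pos (by omega), if_pos h98]
        rw [eA, eB]
        have hmlt : ∀ j ∈ m, j < i := by
          intro j hj
          rcases List.mem_append.mp (hperm.mem_iff.mp hj) with hju | hjl
          · exact (hup j hju).2.1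
          · exact (hlo j hjl).2.1
        refine ⟨m ++ [i], ?_, ?_, hupw, ?_, ?_, ?_, ?_, h2, ?_, h4, ?_⟩
        · exact List.pairwise_append.mpr ⟨hpw, List.pairwise_singleton _ _,
            fun a ha b hb => (List.mem_singleton.mp hb) ▸ hmlt a ha⟩
        · have p1 : (m ++ [i]).Perm (i :: m) := by
            simp
          have p2 : ((up ++ lo) ++ [i]).Perm (i :: (up ++ lo)) := by
            simpa using (List.perm_middle (a := i) (l₁ := up ++ lo) (l₂ := []))
          have : (i :: m).Perm (up ++ (lo ++ [i])) := by
            refine ((hperm.cons i).trans p2.symm).trans ?_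
            simp
          exact p1.trans this
        · exact List.pairwise_append.mpr ⟨hlpw, List.pairwise_singleton _ _,
            fun a ha b hb => (List.mem_singleton.mp hb) ▸ (hlo a ha).2.1⟩
        · intro j hj
          have := hup j hj; exact ⟨this.1, by omega, this.2.2⟩
        · intro j hj
          rcases List.mem_append.mp hj with hjl | hji
          · have := hlo j hjl; exact ⟨this.1, by omega, this.2.2⟩
          · have : j = i := List.mem_singleton.mp hji
            subst this
            exact ⟨hi, by omega, by rw [hc]; exact ⟨hL.1, hL.2, hB⟩⟩
        · simp [h1, hc]
        · simp [h3, hc]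
        · simp [hc]
    · -- not a letter: both sides do nothing
      have eA : pvAStep (lista, upper, lower, lu, ll) c = (lista, upper, lower, lu, ll) := by
        simp [pvAStep, hU, hL]
      have hb1 : ¬(64 < pvByte c ∧ pvByte c < 91) := by unfold pvByte; split_ifs <;> omega
      have hb2 : ¬(96 < pvByte c ∧ pvByte c < 123) := by unfold pvByte; split_ifs <;> omega
      have eB : pvBStep (up, lo) (i, pvByte c) = (up, lo) := by
        simp only [pvBStep]
        rw [if_neg hb1, if_neg hb2]
      rw [eA, eB]
      exact pvInvMono cs i _ _ _ ⟨m, hpw, hperm, hupw, hlpw, hup, hlo, h1, h2, h3, h4, h5⟩ (by omega)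

lemma pvFold (cs : List Char) (pre rest : List Char) (hcs : cs = pre ++ rest)
    (st : List Char × List Char × List Char × Option Char × Option Char)
    (b : List Int × List Int) (h : pvInv cs (pre.length : Int) st b) :
    pvInv cs ((pre.length : Int) + rest.length) (rest.foldl pvAStep st)
      ((PySem.List.enumerate (rest.map pvByte) (pre.length : Int)).foldl pvBStep b) := by
  induction rest generalizing pre st b with
  | nil => simpa using h
  | cons c rest ih =>
    have hc : pvGet cs (pre.length : Int) = c := by
      simp [pvGet, hcs, PySem.List.pyGetD_natCast, List.getD_eq_getElem?_getD]
    have hstep := pvStep cs (pre.length) c (by positivity) hc st b h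
    have hlen : (((pre ++ [c]).length : Int)) = (pre.length : Int) + 1 := by
      simp
    have hrec := ih (pre := pre ++ [c]) (st := pvAStep st c)
      (b := pvBStep b ((pre.length : Int), pvByte c)) (by simp [hcs]) (by rw [hlen]; exact hstep)
    rw [hlen] at hrec
    have he : ((pre.length : Int) + ((c :: rest).length : Int))
        = (pre.length : Int) + 1 + (rest.length : Int) := by
      simp only [List.length_cons]
      push_cast
      ring
    rw [List.map_cons, PySem.List.enumerate_cons, List.foldl_cons, List.foldl_cons, he]
    exact hrec

lemma pvRangeLoop (l : List Char) :
    (PySem.List.pyRange (PySem.List.len l - 1) (-1) (-1)).foldl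
      (fun saida i => saida ++ [PySem.List.pyGetD l i ' ']) [] = l.reverse := by
  have h1 : PySem.List.pyRange ((l.length : Int) - 1) (-1) (-1)
      = (PySem.List.pyRange 0 (l.length : Int)).reverse := by
    rw [PySem.List.pyRange_neg_one_eq_reverse]
    norm_num
  rw [PySem.List.len_eq, h1, PySem.List.foldl_append_singleton_eq_map]
  rw [List.nil_append, List.map_reverse, PySem.List.map_pyGetD_pyRange_zero']

-- ===== VERDICT (by name: the statement is the Claim_ definition above) =====
theorem decodificador_spec : Claim_equal_decodificador := by
  intro s _
  unfold Spec_decodificador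
  have h := pvFold s.toList [] s.toList rfl ([], [], [], none, none) ([], [])
    ⟨[], by simp⟩
  obtain ⟨m, hpw, hperm, -, -, -, -, h1, -, -, -, -⟩ := by simpa using h
  have hsorted : PySem.List.sorted
      ((((PySem.List.enumerate (s.toList.map pvByte) 0).foldl pvBStep ([], [])).1) ++
       (((PySem.List.enumerate (s.toList.map pvByte) 0).foldl pvBStep ([], [])).2)) (fun x => x) false = m :=
    PySem.List.sorted_eq_of_perm_of_pairwise_lt _ _ _ hperm hpw
  have e1 : decodificador s
      = String.mk ((List.foldl pvAStep ([], [], [], none, none) s.toList).1.reverse) :=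
    congrArg String.mk (pvRangeLoop _)
  have e2 : decodificador_alt s
      = String.mk ((PySem.List.sorted
          (((PySem.List.enumerate (s.toList.map pvByte) 0).foldl pvBStep ([], [])).1 ++
           ((PySem.List.enumerate (s.toList.map pvByte) 0).foldl pvBStep ([], [])).2) (fun x => x) false).map
          (fun i => PySem.List.pyGetD s.toList i ' ')) := rfl
  rw [e1, e2, hsorted, h1, List.reverse_reverse]
  rfl
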